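-- pv_equiv track=rewrite | github.com/alexguzman23/MiPrimerRepositorio | Laboratorio2/Ejercicio4.py | transformar_palabras
-- ===== SOURCE A (Python) =====
-- def transformar_palabras(lista, opcion):
--     resultado = []
--
--     for palabra in lista:
--         if opcion == 1:
--             resultado.append(palabra.upper())
--         elif opcion == 2:
--             resultado.append(palabra.lower())
--         elif opcion == 3:
--             resultado.append(palabra.capitalize())
--
--     return resultado
-- ===== SOURCE B (Python) =====
-- def transformar_palabras(lista, opcion):
--     # Character-level rewrite: instead of dispatching to whole-word string
--     # methods, every valid option is expressed as one uniform per-character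
--     # rule parameterised by the character's position in its word.
--     if opcion != 1 and opcion != 2 and opcion != 3:
--         return []
--
--     def tr(i, c):
--         to_upper = opcion == 1 or (opcion == 3 and i == 0)
--         if to_upper and 'a' <= c <= 'z':
--             return chr(ord(c) - 32)
--         if (not to_upper) and 'A' <= c <= 'Z':
--             return chr(ord(c) + 32)
--         return c
--
--     return [''.join(tr(i, c) for i, c in enumerate(p)) for p in lista]
-- ===== Notes on version B (the rewrite author's own statement) =====
-- stated objective: alternative
-- what changed: Instead of branching per word between three whole-word string methods, B validates the option once and expresses all three transforms as a single position-parameterised per-character case rule (ASCII code arithmetic over enumerate(word)), rebuilding each word character by character.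
import Mathlib
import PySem

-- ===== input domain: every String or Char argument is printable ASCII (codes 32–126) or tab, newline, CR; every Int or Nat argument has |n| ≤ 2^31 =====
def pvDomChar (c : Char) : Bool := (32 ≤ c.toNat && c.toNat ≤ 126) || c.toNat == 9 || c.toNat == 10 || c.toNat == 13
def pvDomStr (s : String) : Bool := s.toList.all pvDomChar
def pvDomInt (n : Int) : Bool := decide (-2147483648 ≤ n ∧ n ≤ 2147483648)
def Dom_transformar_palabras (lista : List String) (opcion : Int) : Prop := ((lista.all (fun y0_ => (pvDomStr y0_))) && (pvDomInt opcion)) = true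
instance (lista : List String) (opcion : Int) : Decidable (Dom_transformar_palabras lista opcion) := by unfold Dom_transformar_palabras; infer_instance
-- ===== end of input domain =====

-- B: the option is validated once, and all three transforms become one per-character,
-- position-parameterised case rule applied over enumerate(word); same return values.

-- ===== PORT A =====

-- str.capitalize, exact on ASCII input (first char upper-cased, rest lower-cased)
def pyCapitalize (s : String) : String :=
  match s.toList with
  | [] => ""
  | c :: rest => String.ofList (PySem.Chars.upperChar c :: rest.map PySem.Chars.lowerChar)

def transformar_palabras (lista : List String) (opcion : Int) : List String :=
  lista.foldl
    (fun resultado palabra =>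
      if opcion == 1 then resultado ++ [PySem.Str.upper palabra]
      else if opcion == 2 then resultado ++ [PySem.Str.lower palabra]
      else if opcion == 3 then resultado ++ [pyCapitalize palabra]
      else resultado)
    []

-- ===== PORT B =====

-- per-character rule: upper-shift when the rule says upper, else lower-shift ('a'..'z' / 'A'..'Z' by code arithmetic, as in Source B)
def trChar (opcion : Int) (i : Int) (c : Char) : Char :=
  let toUpper := opcion == 1 || (opcion == 3 && i == 0)
  if toUpper && ('a' ≤ c && c ≤ 'z') then Char.ofNat (c.toNat - 32)
  else if !toUpper && ('A' ≤ c && c ≤ 'Z') then Char.ofNat (c.toNat + 32)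
  else c

def transformar_palabras_alt (lista : List String) (opcion : Int) : List String :=
  if opcion ≠ 1 ∧ opcion ≠ 2 ∧ opcion ≠ 3 then []
  else lista.map (fun p =>
    String.ofList ((PySem.List.enumerate p.toList).map (fun ic => trChar opcion ic.1 ic.2)))

-- ===== PRECONDITION & SPEC =====
def Spec_transformar_palabras (lista : List String) (opcion : Int) (out : List String) : Prop := out = transformar_palabras_alt lista opcion
instance (lista : List String) (opcion : Int) (out : List String) : Decidable (Spec_transformar_palabras lista opcion out) := by unfold Spec_transformar_palabras; infer_instance

-- ===== CLAIM (what is proved, stated in full; the proofs are below) =====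
def Claim_equal_transformar_palabras : Prop := ∀ (lista : List String) (opcion : Int), Dom_transformar_palabras lista opcion → Spec_transformar_palabras lista opcion (transformar_palabras lista opcion)

-- ===== LEMMAS AND PROOFS =====

theorem trChar_upper (i : Int) (c : Char) : trChar 1 i c = PySem.Chars.upperChar c := by
  simp [trChar, PySem.Chars.upperChar, PySem.Chars.islower]

theorem trChar_lower2 (i : Int) (c : Char) : trChar 2 i c = PySem.Chars.lowerChar c := by
  simp [trChar, PySem.Chars.lowerChar, PySem.Chars.isupper]

theorem trChar_lower3 (i : Int) (c : Char) (h : i ≠ 0) : trChar 3 i c = PySem.Chars.lowerChar c := by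
  simp [trChar, h, PySem.Chars.lowerChar, PySem.Chars.isupper]

theorem trChar_cap0 (c : Char) : trChar 3 0 c = PySem.Chars.upperChar c := by
  simp [trChar, PySem.Chars.upperChar, PySem.Chars.islower]

theorem enum_map_upper (l : List Char) (s : Int) :
    (PySem.List.enumerate l s).map (fun ic => trChar 1 ic.1 ic.2) = l.map PySem.Chars.upperChar := by
  induction l generalizing s with
  | nil => simp [PySem.List.enumerate_nil]
  | cons c t ih =>
    simp only [PySem.List.enumerate_cons, List.map_cons]
    rw [ih]
    simp [trChar_upper]

theorem enum_map_lower2 (l : List Char) (s : Int) :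
    (PySem.List.enumerate l s).map (fun ic => trChar 2 ic.1 ic.2) = l.map PySem.Chars.lowerChar := by
  induction l generalizing s with
  | nil => simp [PySem.List.enumerate_nil]
  | cons c t ih =>
    simp only [PySem.List.enumerate_cons, List.map_cons]
    rw [ih]
    simp [trChar_lower2]

theorem enum_map_lower3 (l : List Char) (s : Int) (hs : 1 ≤ s) :
    (PySem.List.enumerate l s).map (fun ic => trChar 3 ic.1 ic.2) = l.map PySem.Chars.lowerChar := by
  induction l generalizing s with
  | nil => simp [PySem.List.enumerate_nil]
  | cons c t ih =>
    simp only [PySem.List.enumerate_cons, List.map_cons]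
    rw [ih (s + 1) (by omega)]
    simp [trChar_lower3 s c (by omega)]

theorem word_upper (p : String) :
    String.ofList ((PySem.List.enumerate p.toList).map (fun ic => trChar 1 ic.1 ic.2)) = PySem.Str.upper p := by
  simp [enum_map_upper, PySem.Str.upper, PySem.Chars.upper]

theorem word_lower (p : String) :
    String.ofList ((PySem.List.enumerate p.toList).map (fun ic => trChar 2 ic.1 ic.2)) = PySem.Str.lower p := by
  simp [enum_map_lower2, PySem.Str.lower, PySem.Chars.lower]

theorem word_cap (p : String) :
    String.ofList ((PySem.List.enumerate p.toList).map (fun ic => trChar 3 ic.1 ic.2)) = pyCapitalize p := by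
  unfold pyCapitalize
  cases h : p.toList with
  | nil => simp [PySem.List.enumerate_nil]
  | cons c rest =>
    simp only [PySem.List.enumerate_cons, List.map_cons, zero_add]
    rw [enum_map_lower3 rest 1 (by omega), trChar_cap0]

theorem flatten_singleton (f : String → String) (l : List String) :
    (l.map (fun x => [f x])).flatten = l.map f := by
  induction l with
  | nil => rfl
  | cons h t ih => simp [ih]

theorem a_eq_b (lista : List String) (opcion : Int) :
    transformar_palabras lista opcion = transformar_palabras_alt lista opcion := by
  unfold transformar_palabras transformar_palabras_alt
  by_cases h1 : opcion = 1
  · subst h1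
    norm_num
    simp [flatten_singleton, word_upper]
  · by_cases h2 : opcion = 2
    · subst h2
      norm_num
      simp [flatten_singleton, word_lower]
    · by_cases h3 : opcion = 3
      · subst h3
        norm_num
        simp [flatten_singleton, word_cap]
      · rw [if_pos ⟨h1, h2, h3⟩]
        induction lista with
        | nil => rfl
        | cons h t ih => simp [List.foldl, h1, h2, h3]

-- ===== VERDICT (by name: the statement is the Claim_ definition above) =====
theorem transformar_palabras_spec : Claim_equal_transformar_palabras := by
  intro lista opcion _
  exact a_eq_b lista opcion
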